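-- pv_equiv track=rewrite | github.com/ait-energy/iesopt | docs/dynamic/julia.py | split_docstr
-- ===== SOURCE A (Python) =====
-- def split_docstr(ds: str):
--     if ds[1] != " ":
--         return ("", ds)
--
--     head = ""
--     content = ""
--
--     in_head = True
--     for line in ds.split("\n"):
--         if (not line.startswith("    ")) and (len(line) > 1):
--             in_head = False
--         if in_head:
--             head += line[4:] + "\n"
--         else:
--             content += line + "\n"
--
--     return (head, content)
-- ===== SOURCE B (Python) =====
-- def split_docstr(ds: str):
--     if ds[1] != " ":
--         return ("", ds)
--     lines = ds.split("\n")
--     i = next((k for k, line in enumerate(lines)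
--               if not line.startswith("    ") and len(line) > 1), len(lines))
--     head = "".join(line[4:] + "\n" for line in lines[:i])
--     content = "".join(line + "\n" for line in lines[i:])
--     return (head, content)
-- ===== Notes on version B (the rewrite author's own statement) =====
-- stated objective: alternative
-- what changed: Replaced the single pass with a latching in_head flag by an explicit search for the first non-indented long line, then two independent joins over the slices before and after that boundary.
import Mathlib
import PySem

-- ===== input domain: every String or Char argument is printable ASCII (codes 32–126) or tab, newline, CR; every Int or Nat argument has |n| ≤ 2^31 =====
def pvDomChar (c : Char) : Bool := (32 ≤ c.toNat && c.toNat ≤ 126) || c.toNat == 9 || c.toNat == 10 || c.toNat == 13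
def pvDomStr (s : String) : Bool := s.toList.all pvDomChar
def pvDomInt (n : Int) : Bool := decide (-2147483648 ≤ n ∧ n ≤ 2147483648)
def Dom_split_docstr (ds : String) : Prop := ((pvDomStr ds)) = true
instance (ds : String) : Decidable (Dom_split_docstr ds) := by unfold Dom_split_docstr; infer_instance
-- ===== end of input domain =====

-- B replaces A's latching in_head flag by an explicit search for the first boundary line
-- followed by two independent joins over the two segments (alternative decomposition, same cost).

-- ===== PORT A =====
-- the loop's line test: (not line.startswith("    ")) and (len(line) > 1)
def pvLineTest (l : List Char) : Bool :=
  !(PySem.Chars.startswith l "    ".toList) && decide (1 < l.length)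

-- the for-loop over the split lines, state (head, content, in_head)
def pvLoopA : List (List Char) → List Char → List Char → Bool → List Char × List Char
  | [], h, c, _ => (h, c)
  | l :: ls, h, c, inh =>
    let inh' := if pvLineTest l then false else inh
    if inh' then
      pvLoopA ls (h ++ (PySem.Chars.slice l (some 4) none ++ ['\n'])) c inh'
    else
      pvLoopA ls h (c ++ (l ++ ['\n'])) inh'

def split_docstr (ds : String) : String × String :=
  match PySem.Str.pyGet? ds 1 with
  | none => ("", ds)      -- Python raises IndexError here; excluded by Pre_split_docstr
  | some ch =>
    if ch ≠ ' ' then ("", ds)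
    else
      let r := pvLoopA (PySem.Chars.splitOn ds.toList ['\n']) [] [] true
      (String.ofList r.1, String.ofList r.2)

-- ===== PORT B =====
-- index of the first line failing the head shape (default: number of lines)
def pvFindSplit : List (List Char) → Nat
  | [] => 0
  | l :: ls => if pvLineTest l then 0 else pvFindSplit ls + 1

-- "".join(f(line) for line in lines)
def pvJoinMap (f : List Char → List Char) : List (List Char) → List Char
  | [] => []
  | l :: ls => f l ++ pvJoinMap f ls

def split_docstr_alt (ds : String) : String × String :=
  match PySem.Str.pyGet? ds 1 with
  | none => ("", ds)      -- Python raises IndexError here; excluded by Pre_split_docstr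
  | some ch =>
    if ch ≠ ' ' then ("", ds)
    else
      let lines := PySem.Chars.splitOn ds.toList ['\n']
      let i := pvFindSplit lines
      (String.ofList (pvJoinMap (fun l => PySem.Chars.slice l (some 4) none ++ ['\n']) (lines.take i)),
       String.ofList (pvJoinMap (fun l => l ++ ['\n']) (lines.drop i)))

-- ===== PRECONDITION & SPEC =====
-- Pre_ excludes strings of length < 2, on which Python's ds[1] raises IndexError.
def Pre_split_docstr (ds : String) : Prop := 2 ≤ ds.toList.length
instance (ds : String) : Decidable (Pre_split_docstr ds) := by unfold Pre_split_docstr; infer_instance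
def pvWitness_split_docstr : String := "a b"

def Spec_split_docstr (ds : String) (out : String × String) : Prop := out = split_docstr_alt ds
instance (ds : String) (out : String × String) : Decidable (Spec_split_docstr ds out) := by unfold Spec_split_docstr; infer_instance

-- ===== CLAIM (what is proved, stated in full; the proofs are below) =====
def Claim_equal_split_docstr : Prop := ∀ (ds : String), Dom_split_docstr ds → Pre_split_docstr ds → Spec_split_docstr ds (split_docstr ds)

-- ===== LEMMAS AND PROOFS =====
-- once in_head is False it stays False: the loop only appends to content
lemma pvLoopA_false (ls : List (List Char)) : ∀ h c,
    pvLoopA ls h c false = (h, c ++ pvJoinMap (fun l => l ++ ['\n']) ls) := by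
  induction ls with
  | nil => intro h c; simp [pvLoopA, pvJoinMap]
  | cons l ls ih =>
    intro h c
    simp [pvLoopA, ih, pvJoinMap]

-- the latching loop started with in_head = True splits exactly at pvFindSplit
lemma pvLoopA_true (ls : List (List Char)) : ∀ h c,
    pvLoopA ls h c true =
      (h ++ pvJoinMap (fun l => PySem.Chars.slice l (some 4) none ++ ['\n']) (ls.take (pvFindSplit ls)),
       c ++ pvJoinMap (fun l => l ++ ['\n']) (ls.drop (pvFindSplit ls))) := by
  induction ls with
  | nil => intro h c; simp [pvLoopA, pvJoinMap, pvFindSplit]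
  | cons l ls ih =>
    intro h c
    by_cases hp : pvLineTest l
    · simp [pvLoopA, hp, pvLoopA_false, pvFindSplit, pvJoinMap]
    · simp [pvLoopA, hp, ih, pvFindSplit, pvJoinMap]

-- ===== VERDICT (by name: the statement is the Claim_ definition above) =====
theorem split_docstr_spec : Claim_equal_split_docstr := by
  intro ds _ _
  unfold Spec_split_docstr split_docstr split_docstr_alt
  cases hg : PySem.Str.pyGet? ds 1 with
  | none => rfl
  | some ch =>
    by_cases hc : ch = ' '
    · simp only [hc, ne_eq, not_true_eq_false, if_false]
      rw [pvLoopA_true]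
      simp
    · simp [hc]
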